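-- pv_equiv track=rewrite | github.com/SumanthBalachandra/CSCI-544-Applied-Natural-Language-Processing | Assignment 3/hmmlearn3.py | getTrigramTagPosSequenceCount
-- ===== SOURCE A (Python) =====
-- def getTrigramTagPosSequenceCount(lines):
--     posTagSequence = {}
--     for line in lines:
--         words = line.split()
--         words.insert(0, "<start>")
--         words.append("<end>")
--         first = "<start>"
--         second = "<empty>"
--         for word in words:
--             tag = ""
--             tagIndex = word.rfind('/')
--             if tagIndex == -1:
--                 if word == "<start>":
--                     tag = "<start>"
--                 elif word == "<end>":
--                     tag = "<end>"
--             else: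
--                 tag = word[tagIndex + 1 :]
--             #tag = tag.lower()
--             if tag not in posTagSequence:
--                 posTagSequence[tag] = {}
--             if second not in posTagSequence[tag]:
--                 posTagSequence[tag][second] = {}
--             if first not in posTagSequence[tag][second]:
--                 posTagSequence[tag][second][first] = 1
--             else:
--                 posTagSequence[tag][second][first] += 1
--             first = second
--             second = tag
--     return posTagSequence
-- ===== SOURCE B (Python) =====
-- def getTrigramTagPosSequenceCount(lines):
--     def tag_of(word):
--         i = word.rfind('/')
--         if i != -1:
--             return word[i + 1:]
--         if word == "<start>":
--             return "<start>"
--         if word == "<end>":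
--             return "<end>"
--         return ""
--
--     # Phase 1: collect every trigram of tags across all lines into one flat list.
--     trigrams = []
--     for line in lines:
--         tags = ["<start>", "<empty>"] + [tag_of(w) for w in ["<start>"] + line.split() + ["<end>"]]
--         for t in zip(tags, tags[1:], tags[2:]):
--             trigrams.append(t)
--
--     # Phase 2: count them in a single flat dict keyed by the whole triple.
--     flat = {}
--     for t in trigrams:
--         flat[t] = flat.get(t, 0) + 1
--
--     # Phase 3: group the finished flat counts into the nested dict
--     # (dict insertion order = first occurrence of each triple, matching A's orders).
--     result = {}
--     for (a, b, c), n in flat.items():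
--         result.setdefault(c, {}).setdefault(b, {})[a] = n
--     return result
-- ===== Notes on version B (the rewrite author's own statement) =====
-- stated objective: alternative
-- what changed: B is a staged pipeline over a different data structure: it first collects all trigrams of tags into one flat list, then counts them in a single FLAT dict keyed by the whole (a,b,c) triple, and only afterwards groups the finished counts into the nested dict in one pass over flat.items(); A instead increments the nested dict-of-dict-of-dict on the fly with two rolling state variables.
import Mathlib
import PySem

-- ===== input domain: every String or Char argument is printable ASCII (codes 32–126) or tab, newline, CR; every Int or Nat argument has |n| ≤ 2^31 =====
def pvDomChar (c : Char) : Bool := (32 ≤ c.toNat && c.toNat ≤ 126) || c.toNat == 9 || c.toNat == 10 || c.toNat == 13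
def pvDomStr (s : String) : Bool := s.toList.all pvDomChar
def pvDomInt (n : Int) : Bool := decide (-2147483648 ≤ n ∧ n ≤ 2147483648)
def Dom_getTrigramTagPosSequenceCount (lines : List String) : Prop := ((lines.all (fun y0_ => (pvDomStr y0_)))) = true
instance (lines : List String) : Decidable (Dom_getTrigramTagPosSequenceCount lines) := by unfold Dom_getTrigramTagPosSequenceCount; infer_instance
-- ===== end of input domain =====

-- B replaces A's on-the-fly nested counting (rolling two-variable state) by a staged pipeline:
-- flat trigram list, flat count dict keyed by the whole triple, then one grouping pass; objective: alternative, same cost.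

-- ===== PORT A =====
-- nested counter dictionaries, exactly Python's dict-of-dict-of-dict
abbrev PvD1 := PySem.Dict String Int
abbrev PvD2 := PySem.Dict String PvD1
abbrev PvD3 := PySem.Dict String PvD2

-- one iteration of A's inner 'for word in words' loop; state = (posTagSequence, first, second)
def pvStepA (st : PvD3 × String × String) (word : String) : PvD3 × String × String :=
  let d := st.1
  let first := st.2.1
  let second := st.2.2
  let tagIndex := PySem.Str.rfind word "/"
  let tag :=
    if tagIndex == -1 then
      if word == "<start>" then "<start>"
      else if word == "<end>" then "<end>"
      else ""
    else PySem.Str.slice word (some (tagIndex + 1)) none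
  let d := if d.contains tag then d else d.insert tag PySem.Dict.empty
  let m2 := d.getD tag PySem.Dict.empty
  let m2 := if m2.contains second then m2 else m2.insert second PySem.Dict.empty
  let m1 := m2.getD second PySem.Dict.empty
  let m1 := if m1.contains first then m1.insert first (m1.getD first 0 + 1) else m1.insert first 1
  (d.insert tag (m2.insert second m1), second, tag)

def getTrigramTagPosSequenceCount (lines : List String) : List (String × List (String × List (String × Int))) :=
  let d :=
    lines.foldl (fun d line =>
      let words := "<start>" :: PySem.Str.split₀ line ++ ["<end>"]
      (words.foldl pvStepA (d, "<start>", "<empty>")).1) PySem.Dict.empty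
  d.items.map (fun p => (p.1, p.2.items.map (fun q => (q.1, q.2.items))))

-- ===== PORT B =====
-- a trigram (a, b, c) of tags, as produced by zip(tags, tags[1:], tags[2:])
abbrev PvTri := (String × String) × String
abbrev PvFlat := PySem.Dict PvTri Int

def pvTagOf (word : String) : String :=
  let i := PySem.Str.rfind word "/"
  if i != -1 then PySem.Str.slice word (some (i + 1)) none
  else if word == "<start>" then "<start>"
  else if word == "<end>" then "<end>"
  else ""

def pvLineTags (line : String) : List String :=
  ["<start>", "<empty>"] ++ ("<start>" :: PySem.Str.split₀ line ++ ["<end>"]).map pvTagOf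

-- Phase 3's body: result.setdefault(c, {}).setdefault(b, {})[a] = n
def pvGroupStep (r : PvD3) (p : PvTri × Int) : PvD3 :=
  let a := p.1.1.1
  let b := p.1.1.2
  let c := p.1.2
  let r1 := r.setdefault c PySem.Dict.empty
  let m2 := (r1.getD c PySem.Dict.empty).setdefault b PySem.Dict.empty
  let m1 := m2.getD b PySem.Dict.empty
  r1.insert c (m2.insert b (m1.insert a p.2))

def getTrigramTagPosSequenceCount_alt (lines : List String) : List (String × List (String × List (String × Int))) :=
  -- Phase 1: one flat list of all trigrams
  let trigrams :=
    lines.foldl (fun acc line =>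
      let tags := pvLineTags line
      ((tags.zip (tags.drop 1)).zip (tags.drop 2)).foldl (fun acc t => acc ++ [t]) acc) []
  -- Phase 2: flat counting keyed by the whole triple
  let flat : PvFlat := trigrams.foldl (fun d t => d.insert t (d.getD t 0 + 1)) PySem.Dict.empty
  -- Phase 3: group the finished counts into the nested dict
  let d := flat.items.foldl pvGroupStep PySem.Dict.empty
  d.items.map (fun p => (p.1, p.2.items.map (fun q => (q.1, q.2.items))))

-- ===== PRECONDITION & SPEC =====
def Spec_getTrigramTagPosSequenceCount (lines : List String) (out : List (String × List (String × List (String × Int)))) : Prop := out = getTrigramTagPosSequenceCount_alt lines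
instance (lines : List String) (out : List (String × List (String × List (String × Int)))) : Decidable (Spec_getTrigramTagPosSequenceCount lines out) := by unfold Spec_getTrigramTagPosSequenceCount; infer_instance

-- ===== CLAIM (what is proved, stated in full; the proofs are below) =====
def Claim_equal_getTrigramTagPosSequenceCount : Prop := ∀ (lines : List String), Dom_getTrigramTagPosSequenceCount lines → Spec_getTrigramTagPosSequenceCount lines (getTrigramTagPosSequenceCount lines)

-- ===== LEMMAS AND PROOFS =====

-- proof-side canonical forms: set / read / presence of the nested count at a triple
def pvNSet (r : PvD3) (t : PvTri) (n : Int) : PvD3 :=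
  let m2 := r.getD t.2 PySem.Dict.empty
  let m1 := m2.getD t.1.2 PySem.Dict.empty
  r.insert t.2 (m2.insert t.1.2 (m1.insert t.1.1 n))

def pvNGet (r : PvD3) (t : PvTri) : Int :=
  ((r.getD t.2 PySem.Dict.empty).getD t.1.2 PySem.Dict.empty).getD t.1.1 0

def pvNHas (r : PvD3) (t : PvTri) : Prop :=
  r.contains t.2 = true ∧
  (r.getD t.2 PySem.Dict.empty).contains t.1.2 = true ∧
  ((r.getD t.2 PySem.Dict.empty).getD t.1.2 PySem.Dict.empty).contains t.1.1 = true

-- the nested increment both programs boil down to, per trigram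
def pvNIncr (r : PvD3) (t : PvTri) : PvD3 := pvNSet r t (pvNGet r t + 1)

theorem pv_setdefault_getD {ν : Type} (d : PySem.Dict String ν) (k : String) (v : ν) :
    (d.setdefault k v).getD k v = d.getD k v := by
  by_cases h : d.contains k = true
  · rw [PySem.Dict.setdefault_of_contains d v h]
  · rw [PySem.Dict.setdefault_of_not_contains d v (by simpa using h),
      PySem.Dict.getD_insert_self, PySem.Dict.getD_of_not_contains d v (by simpa using h)]

theorem pv_setdefault_insert {ν : Type} (d : PySem.Dict String ν) (k : String) (v w : ν) :
    (d.setdefault k v).insert k w = d.insert k w := by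
  by_cases h : d.contains k = true
  · rw [PySem.Dict.setdefault_of_contains d v h]
  · rw [PySem.Dict.setdefault_of_not_contains d v (by simpa using h),
      PySem.Dict.insert_insert_self]

-- B's grouping step sets the nested count
theorem pvGroupStep_eq (r : PvD3) (p : PvTri × Int) :
    pvGroupStep r p = pvNSet r p.1 p.2 := by
  unfold pvGroupStep pvNSet
  simp only [pv_setdefault_getD, pv_setdefault_insert]

-- A's inline tag extraction is B's pvTagOf (branch order swapped)
theorem pv_tag_eq (w : String) :
    (if PySem.Str.rfind w "/" == -1 then
       if w == "<start>" then "<start>" else if w == "<end>" then "<end>" else ""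
     else PySem.Str.slice w (some (PySem.Str.rfind w "/" + 1)) none) = pvTagOf w := by
  unfold pvTagOf
  simp

theorem pv_ite_setdefault {ν : Type} (d : PySem.Dict String ν) (k : String) (v : ν) :
    (if d.contains k then d else d.insert k v) = d.setdefault k v := by
  by_cases h : d.contains k = true
  · simp [h, PySem.Dict.setdefault_of_contains d v h]
  · simp [h, PySem.Dict.setdefault_of_not_contains d v (by simpa using h)]

theorem pv_ite_insert_count (m : PvD1) (a : String) :
    (if m.contains a then m.insert a (m.getD a 0 + 1) else m.insert a 1)
      = m.insert a (m.getD a 0 + 1) := by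
  by_cases h : m.contains a = true
  · simp [h]
  · simp [h, PySem.Dict.getD_of_not_contains m 0 (by simpa using h)]

-- A's branching update is the nested increment
theorem pvStepA_eq (d : PvD3) (f s : String) (w : String) :
    pvStepA (d, f, s) w = (pvNIncr d ((f, s), pvTagOf w), s, pvTagOf w) := by
  unfold pvStepA pvNIncr pvNSet pvNGet
  simp only [pv_tag_eq, pv_ite_setdefault, pv_ite_insert_count, pv_setdefault_getD,
    pv_setdefault_insert]

-- reads after a set
theorem pvNGet_set_self (r : PvD3) (t : PvTri) (n : Int) : pvNGet (pvNSet r t n) t = n := by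
  unfold pvNGet pvNSet
  simp [PySem.Dict.getD_insert_self]

theorem pvNGet_set_ne (r : PvD3) (t t' : PvTri) (n : Int) (h : t' ≠ t) :
    pvNGet (pvNSet r t' n) t = pvNGet r t := by
  obtain ⟨⟨a, b⟩, c⟩ := t; obtain ⟨⟨a', b'⟩, c'⟩ := t'
  unfold pvNGet pvNSet
  by_cases hc : c' = c
  · subst hc
    by_cases hb : b' = b
    · subst hb
      have ha : a ≠ a' := fun he => h (by rw [he])
      simp [PySem.Dict.getD_insert, ha]
    · have hb2 : b ≠ b' := Ne.symm hb
      simp [PySem.Dict.getD_insert, hb2]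
  · have hc2 : c ≠ c' := Ne.symm hc
    simp [PySem.Dict.getD_insert, hc2]

-- presence after a set
theorem pvNHas_set_self (r : PvD3) (t : PvTri) (n : Int) : pvNHas (pvNSet r t n) t := by
  unfold pvNHas pvNSet
  simp [PySem.Dict.getD_insert_self, PySem.Dict.contains_insert_self]

theorem pvNHas_set (r : PvD3) (t t' : PvTri) (n : Int) (h : pvNHas r t) :
    pvNHas (pvNSet r t' n) t := by
  obtain ⟨⟨a, b⟩, c⟩ := t; obtain ⟨⟨a', b'⟩, c'⟩ := t'
  obtain ⟨h1, h2, h3⟩ := h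
  unfold pvNHas pvNSet
  by_cases hc : c' = c
  · subst hc
    by_cases hb : b' = b
    · subst hb
      by_cases ha : a' = a
      · subst ha
        simp [PySem.Dict.getD_insert_self, PySem.Dict.contains_insert_self]
      · simp [PySem.Dict.getD_insert_self, PySem.Dict.contains_insert_self,
          PySem.Dict.contains_insert, h3]
    · have hb2 : b ≠ b' := Ne.symm hb
      simp [PySem.Dict.getD_insert_self, PySem.Dict.contains_insert_self,
        PySem.Dict.getD_insert, PySem.Dict.contains_insert, hb2, h2, h3]
  · have hc2 : c ≠ c' := Ne.symm hc
    simp [PySem.Dict.getD_insert, PySem.Dict.contains_insert, hc2, h1, h2, h3]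

-- two inserts at distinct keys, the first one PRESENT, commute
theorem pv_insert_comm {ν : Type} (d : PySem.Dict String ν) (k k' : String) (v v' : ν)
    (hk : d.contains k = true) (hne : k ≠ k') :
    (d.insert k v).insert k' v' = (d.insert k' v').insert k v := by
  apply PySem.Dict.ext
  have hk1 : (d.insert k' v').contains k = true := by
    simp [PySem.Dict.contains_insert, hk]
  rw [PySem.Dict.items_insert_of_contains _ _ hk1]
  by_cases h2 : d.contains k' = true
  · have hkk : (d.insert k v).contains k' = true := by
      simp [PySem.Dict.contains_insert, h2]
    rw [PySem.Dict.items_insert_of_contains _ _ hkk,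
      PySem.Dict.items_insert_of_contains _ _ hk,
      PySem.Dict.items_insert_of_contains _ _ h2]
    rw [List.map_map, List.map_map]
    apply List.map_congr_left
    intro p _
    by_cases hp : p.1 = k <;> by_cases hp' : p.1 = k' <;>
      simp_all [Function.comp, Ne.symm hne]
  · have h2' : d.contains k' = false := by simpa using h2
    have hkk : (d.insert k v).contains k' = false := by
      simp [PySem.Dict.contains_insert, h2', Ne.symm hne]
    rw [PySem.Dict.items_insert_of_not_contains _ _ hkk,
      PySem.Dict.items_insert_of_contains _ _ hk,
      PySem.Dict.items_insert_of_not_contains _ _ h2']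
    rw [List.map_append]
    simp [Ne.symm hne]

-- overwrite absorbs: setting the same triple twice keeps only the last value
theorem pvNSet_set_self (r : PvD3) (t : PvTri) (v w : Int) :
    pvNSet (pvNSet r t v) t w = pvNSet r t w := by
  obtain ⟨⟨a, b⟩, c⟩ := t
  unfold pvNSet
  simp [PySem.Dict.getD_insert_self, PySem.Dict.insert_insert_self]

-- a set at a PRESENT triple commutes with a set at any other triple
theorem pvNSet_comm (r : PvD3) (t t' : PvTri) (w n : Int)
    (ht : pvNHas r t) (hne : t' ≠ t) :
    pvNSet (pvNSet r t w) t' n = pvNSet (pvNSet r t' n) t w := by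
  obtain ⟨⟨a, b⟩, c⟩ := t; obtain ⟨⟨a', b'⟩, c'⟩ := t'
  obtain ⟨h1, h2, h3⟩ := ht
  unfold pvNSet
  by_cases hc : c' = c
  · subst hc
    by_cases hb : b' = b
    · subst hb
      have ha : a' ≠ a := fun he => hne (by rw [he])
      simp only [PySem.Dict.getD_insert_self, PySem.Dict.insert_insert_self]
      rw [pv_insert_comm _ a a' _ _ h3 (Ne.symm ha)]
    · have hb2 : b ≠ b' := Ne.symm hb
      simp only [PySem.Dict.getD_insert_self, PySem.Dict.insert_insert_self,
        PySem.Dict.getD_insert_of_ne _ _ _ hb2, PySem.Dict.getD_insert_of_ne _ _ _ (Ne.symm hb2)]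
      rw [pv_insert_comm _ b b' _ _ h2 (Ne.symm hb)]
  · have hc2 : c ≠ c' := Ne.symm hc
    simp only [PySem.Dict.getD_insert_of_ne _ _ _ hc2, PySem.Dict.getD_insert_of_ne _ _ _ (Ne.symm hc2)]
    rw [pv_insert_comm _ c c' _ _ h1 (Ne.symm hc)]

def pvGStep (r : PvD3) (p : PvTri × Int) : PvD3 := pvNSet r p.1 p.2

-- a final overwrite at a present triple moves past a fold over other keys
theorem pv_foldl_set_comm (l : List (PvTri × Int)) (r : PvD3) (t : PvTri) (w : Int)
    (ht : pvNHas r t) (hl : ∀ p ∈ l, p.1 ≠ t) :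
    l.foldl pvGStep (pvNSet r t w) = pvNSet (l.foldl pvGStep r) t w := by
  induction l generalizing r with
  | nil => rfl
  | cons p l ih =>
    simp only [List.foldl_cons]
    rw [show pvGStep (pvNSet r t w) p = pvNSet (pvGStep r p) t w from
      pvNSet_comm r t p.1 w p.2 ht (hl p (by simp))]
    exact ih (pvGStep r p) (pvNHas_set r t p.1 p.2 ht) (fun q hq => hl q (by simp [hq]))

-- reading a triple no item of l mentions is unchanged by the grouping fold
theorem pv_nGet_foldl_notmem (l : List (PvTri × Int)) (r : PvD3) (t : PvTri)
    (hl : ∀ p ∈ l, p.1 ≠ t) :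
    pvNGet (l.foldl pvGStep r) t = pvNGet r t := by
  induction l generalizing r with
  | nil => rfl
  | cons p l ih =>
    simp only [List.foldl_cons]
    rw [ih (pvGStep r p) (fun q hq => hl q (by simp [hq]))]
    simp only [pvGStep]
    exact pvNGet_set_ne r t p.1 p.2 (hl p (by simp))

-- reading a triple whose item (t, v) is in l (keys nodup) yields v
theorem pv_nGet_foldl_mem (l : List (PvTri × Int)) (r : PvD3) (t : PvTri) (v : Int)
    (hnd : (l.map Prod.fst).Nodup) (hm : (t, v) ∈ l) :
    pvNGet (l.foldl pvGStep r) t = v := by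
  induction l generalizing r with
  | nil => cases hm
  | cons p l ih =>
    simp only [List.map_cons, List.nodup_cons] at hnd
    rcases List.mem_cons.mp hm with h | h
    · subst h
      simp only [List.foldl_cons]
      rw [pv_nGet_foldl_notmem l (pvGStep r (t, v)) t
        (fun q hq hqt => hnd.1 (by simpa [← hqt] using List.mem_map_of_mem (f := Prod.fst) hq))]
      simp only [pvGStep]
      exact pvNGet_set_self r t v
    · simp only [List.foldl_cons]
      exact ih (pvGStep r p) hnd.2 h

-- grouping a flat items list with one value bumped = grouping, then bumping the nested count
theorem pv_group_bump (l : List (PvTri × Int)) (r : PvD3) (t : PvTri) (v : Int)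
    (hnd : (l.map Prod.fst).Nodup) (hm : (t, v) ∈ l) :
    (l.map (fun p => if p.1 == t then (t, v + 1) else p)).foldl pvGStep r
      = pvNSet (l.foldl pvGStep r) t (v + 1) := by
  induction l generalizing r with
  | nil => cases hm
  | cons p l ih =>
    simp only [List.map_cons, List.nodup_cons] at hnd
    by_cases hp : p.1 = t
    · have hrest : ∀ q ∈ l, q.1 ≠ t :=
        fun q hq hqt => hnd.1 (by rw [hp, ← hqt]; exact List.mem_map_of_mem hq)
      have hpv : p = (t, v) := by
        rcases List.mem_cons.mp hm with h | h
        · exact h.symm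
        · exact (hrest (t, v) h rfl).elim
      subst hpv
      have hmap : l.map (fun p => if p.1 == t then (t, v + 1) else p) = l := by
        have hid : ∀ q ∈ l, (fun p => if p.1 == t then (t, v + 1) else p) q = id q :=
          fun q hq => by simp [hrest q hq]
        rw [List.map_congr_left hid, List.map_id]
      simp only [List.map_cons, List.foldl_cons, beq_self_eq_true, hmap]
      show l.foldl pvGStep (pvGStep r (t, v + 1)) = pvNSet (l.foldl pvGStep (pvGStep r (t, v))) t (v + 1)
      have : pvGStep r (t, v + 1) = pvNSet (pvGStep r (t, v)) t (v + 1) :=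
        (pvNSet_set_self r t v (v + 1)).symm
      rw [this]
      exact pv_foldl_set_comm l (pvGStep r (t, v)) t (v + 1) (pvNHas_set_self r t v) hrest
    · have hm' : (t, v) ∈ l := by
        rcases List.mem_cons.mp hm with h | h
        · exact absurd (by rw [← h]) hp
        · exact h
      simp only [List.map_cons, List.foldl_cons]
      rw [show (p.1 == t) = false by simpa using hp]
      exact ih (pvGStep r p) hnd.2 hm'

def pvFlatIncr (d : PvFlat) (t : PvTri) : PvFlat := d.insert t (d.getD t 0 + 1)

def pvGroup (d : PvFlat) : PvD3 := d.items.foldl pvGStep PySem.Dict.empty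

-- the crux: grouping after one flat increment = one nested increment after grouping
theorem pv_group_incr (d : PvFlat) (t : PvTri) (hnd : d.keys.Nodup) :
    pvGroup (pvFlatIncr d t) = pvNIncr (pvGroup d) t := by
  have hkeys : d.keys = d.items.map Prod.fst := by simp only [PySem.Dict.keys]
  by_cases hc : d.contains t = true
  · -- overwrite in place
    have hget : d.get? t = some (d.getD t 0) := by
      rcases Option.isSome_iff_exists.mp
          (show (d.get? t).isSome = true by rw [← PySem.Dict.contains_eq_isSome_get? d t]; exact hc)
        with ⟨v, hv⟩
      rw [hv, PySem.Dict.getD_of_get?_eq_some d 0 hv]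
    have hmem : (t, d.getD t 0) ∈ d.items := PySem.Dict.mem_items_of_get?_eq_some d hget
    unfold pvGroup pvFlatIncr pvNIncr
    rw [PySem.Dict.items_insert_of_contains _ _ hc]
    rw [pv_group_bump d.items PySem.Dict.empty t (d.getD t 0) (hkeys ▸ hnd) hmem]
    rw [pv_nGet_foldl_mem d.items PySem.Dict.empty t (d.getD t 0) (hkeys ▸ hnd) hmem]
  · -- fresh key appends
    have hc' : d.contains t = false := by simpa using hc
    have hnot : ∀ p ∈ d.items, p.1 ≠ t := by
      intro p hp hpt
      have ht : t ∈ d.keys := hkeys ▸ (hpt ▸ List.mem_map_of_mem (f := Prod.fst) hp)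
      have hct := (PySem.Dict.contains_iff_mem_keys d t).mpr ht
      rw [hc'] at hct
      exact Bool.false_ne_true hct
    unfold pvGroup pvFlatIncr pvNIncr
    rw [PySem.Dict.items_insert_of_not_contains _ _ hc',
      PySem.Dict.getD_of_not_contains d 0 hc', List.foldl_append]
    rw [pv_nGet_foldl_notmem d.items PySem.Dict.empty t hnot]
    show pvNSet (d.items.foldl pvGStep PySem.Dict.empty) t (0 + 1)
      = pvNSet (d.items.foldl pvGStep PySem.Dict.empty) t (pvNGet PySem.Dict.empty t + 1)
    simp [pvNGet]

-- folding nested increments from a grouped start = grouping the flat-counted dict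
theorem pv_fold_group (ts : List PvTri) (d : PvFlat) (hnd : d.keys.Nodup) :
    ts.foldl pvNIncr (pvGroup d) = pvGroup (ts.foldl pvFlatIncr d) := by
  induction ts generalizing d with
  | nil => rfl
  | cons t ts ih =>
    simp only [List.foldl_cons]
    rw [← pv_group_incr d t hnd]
    exact ih (pvFlatIncr d t) (PySem.Dict.nodup_keys_insert d t (d.getD t 0 + 1) hnd)

-- the sliding windows of trigrams over a tag list
def pvWin (l : List String) : List PvTri := (l.zip (l.drop 1)).zip (l.drop 2)

-- A's inner word loop with rolling state = nested increments over the windowed triples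
theorem pvInner_eq (ws : List String) (d : PvD3) (f s : String) :
    (ws.foldl pvStepA (d, f, s)).1 = (pvWin (f :: s :: ws.map pvTagOf)).foldl pvNIncr d := by
  induction ws generalizing d f s with
  | nil => simp [pvWin]
  | cons w ws ih =>
    simp only [pvWin, List.foldl_cons, pvStepA_eq, List.map_cons, List.drop_succ_cons,
      List.drop_zero, List.zip_cons_cons]
    exact ih (pvNIncr d ((f, s), pvTagOf w)) s (pvTagOf w)

-- concatenating per-line trigram lists commutes with the nested-increment fold
theorem pv_lines_concat (ls : List String) (d : PvD3) :
    ls.foldl (fun d line => (pvWin (pvLineTags line)).foldl pvNIncr d) d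
      = (ls.flatMap (fun line => pvWin (pvLineTags line))).foldl pvNIncr d := by
  induction ls generalizing d with
  | nil => rfl
  | cons l ls ih =>
    simp only [List.foldl_cons, List.flatMap_cons, List.foldl_append]
    exact ih _

-- ===== VERDICT (by name: the statement is the Claim_ definition above) =====
theorem getTrigramTagPosSequenceCount_spec : Claim_equal_getTrigramTagPosSequenceCount := by
  intro lines _
  unfold Spec_getTrigramTagPosSequenceCount getTrigramTagPosSequenceCount getTrigramTagPosSequenceCount_alt
  -- reduce A's line loop to nested increments over per-line windows
  have hA : (fun (d : PvD3) (line : String) =>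
      (("<start>" :: PySem.Str.split₀ line ++ ["<end>"]).foldl pvStepA (d, "<start>", "<empty>")).1)
      = (fun (d : PvD3) (line : String) => (pvWin (pvLineTags line)).foldl pvNIncr d) := by
    funext d line
    rw [pvInner_eq]
    rfl
  rw [hA, pv_lines_concat]
  -- reduce B's trigram collection to the same flat list
  have hB : (fun (acc : List PvTri) (line : String) =>
      (pvWin (pvLineTags line)).foldl (fun acc t => acc ++ [t]) acc)
      = (fun (acc : List PvTri) (line : String) => acc ++ pvWin (pvLineTags line)) := by
    funext acc line
    rw [PySem.List.foldl_append_singleton]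
  show ((lines.flatMap (fun line => pvWin (pvLineTags line))).foldl pvNIncr
      PySem.Dict.empty).items.map _
    = (((lines.foldl (fun acc line =>
        (pvWin (pvLineTags line)).foldl (fun acc t => acc ++ [t]) acc) []).foldl
          pvFlatIncr PySem.Dict.empty).items.foldl pvGroupStep PySem.Dict.empty).items.map _
  have hflat : lines.foldl (fun acc line =>
      (pvWin (pvLineTags line)).foldl (fun acc t => acc ++ [t]) acc) []
      = lines.flatMap (fun line => pvWin (pvLineTags line)) := by
    rw [hB]
    exact (PySem.List.foldl_append_eq_flatMap (fun line => pvWin (pvLineTags line)) lines []).trans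
      (List.nil_append _)
  rw [hflat]
  have hg : pvGroupStep = pvGStep := by
    funext r p
    rw [pvGroupStep_eq]
    rfl
  have hempty : pvGroup (PySem.Dict.empty : PvFlat) = PySem.Dict.empty := rfl
  rw [hg]
  rw [show List.foldl pvGStep PySem.Dict.empty
      ((lines.flatMap (fun line => pvWin (pvLineTags line))).foldl pvFlatIncr
        PySem.Dict.empty).items
    = pvGroup ((lines.flatMap (fun line => pvWin (pvLineTags line))).foldl pvFlatIncr
        PySem.Dict.empty) from rfl]
  rw [← pv_fold_group _ _ (PySem.Dict.nodup_keys_empty), hempty]
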